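-- pv_equiv track=rewrite | github.com/NIaa/codewars | Solutions/5_kyu/Is my friend cheating?/cheat.py | removNb
-- ===== SOURCE A (Python) =====
-- def removNb(n):
--     ret=[]
--     sum=n*(n+1)//2
--     for i in range(1,n+1):
--         if (sum+1)%(i+1)==0:
--             j=(sum+1)//(i+1)-1
--             if j in range(1,n+1):
--                 ret.append((i,j))
--     return ret
-- ===== SOURCE B (Python) =====
-- def removNb(n):
--     # Two-pointer scan: walk i up from 1 and j down from n, comparing
--     # (i+1)*(j+1) with n*(n+1)//2 + 1; emits pairs already in increasing-i order.
--     total = n * (n + 1) // 2 + 1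
--     res = []
--     i, j = 1, n
--     while i <= n and j >= 1:
--         p = (i + 1) * (j + 1)
--         if p < total:
--             i += 1
--         elif p > total:
--             j -= 1
--         else:
--             res.append((i, j))
--             i += 1
--             j -= 1
--     return res
-- ===== Notes on version B (the rewrite author's own statement) =====
-- stated objective: alternative
-- what changed: Replaces A's per-i divisibility test ((sum+1) % (i+1)) with a two-pointer scan that moves i up and j down comparing the product (i+1)*(j+1) against sum+1, emitting pairs with no division or modulo at all.
import Mathlib
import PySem

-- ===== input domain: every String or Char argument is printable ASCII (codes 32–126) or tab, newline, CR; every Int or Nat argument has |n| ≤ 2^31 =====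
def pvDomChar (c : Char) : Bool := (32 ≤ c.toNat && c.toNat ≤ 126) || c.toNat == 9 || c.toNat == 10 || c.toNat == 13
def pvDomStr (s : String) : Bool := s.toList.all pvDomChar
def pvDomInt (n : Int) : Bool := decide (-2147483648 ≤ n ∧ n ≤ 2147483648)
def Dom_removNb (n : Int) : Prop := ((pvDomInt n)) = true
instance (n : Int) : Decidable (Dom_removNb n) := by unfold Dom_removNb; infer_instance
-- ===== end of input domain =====

-- B replaces A's per-i divisibility scan by a two-pointer scan (i up, j down) comparing
-- the product (i+1)*(j+1) with sum+1; same cost class, no division/modulo in the loop.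

-- ===== PORT A =====
def removNb (n : Int) : List (Int × Int) :=
  let sum := PySem.Int.floordiv (n * (n + 1)) 2
  (PySem.List.pyRange 1 (n + 1) 1).foldl
    (fun ret i =>
      if PySem.Int.mod (sum + 1) (i + 1) = 0 then
        let j := PySem.Int.floordiv (sum + 1) (i + 1) - 1
        if 1 ≤ j ∧ j < n + 1 then ret ++ [(i, j)] else ret
      else ret) []

-- ===== PORT B =====
def removNbLoop (total n i j : Int) (res : List (Int × Int)) : List (Int × Int) :=
  if _h : i ≤ n ∧ 1 ≤ j then
    let p := (i + 1) * (j + 1)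
    if p < total then removNbLoop total n (i + 1) j res
    else if total < p then removNbLoop total n i (j - 1) res
    else removNbLoop total n (i + 1) (j - 1) (res ++ [(i, j)])
  else res
termination_by (n - i + j + 1).toNat
decreasing_by all_goals omega

def removNb_alt (n : Int) : List (Int × Int) :=
  removNbLoop (PySem.Int.floordiv (n * (n + 1)) 2 + 1) n 1 n []

-- ===== PRECONDITION & SPEC =====
def Spec_removNb (n : Int) (out : List (Int × Int)) : Prop := out = removNb_alt n
instance (n : Int) (out : List (Int × Int)) : Decidable (Spec_removNb n out) := by unfold Spec_removNb; infer_instance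

-- ===== CLAIM (what is proved, stated in full; the proofs are below) =====
def Claim_equal_removNb : Prop := ∀ (n : Int), Dom_removNb n → Spec_removNb n (removNb n)

-- ===== LEMMAS AND PROOFS =====

/-- The per-index entry of A's scan: `some (i, j)` iff `i+1` divides `T`
    and the cofactor minus one lies in `[1, n]`. -/
def pvEntry (n T i : Int) : Option (Int × Int) :=
  if PySem.Int.mod T (i + 1) = 0 then
    if 1 ≤ PySem.Int.floordiv T (i + 1) - 1 ∧ PySem.Int.floordiv T (i + 1) - 1 < n + 1 then
      some (i, PySem.Int.floordiv T (i + 1) - 1)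
    else none
  else none

lemma pvEntry_eq_some (n T i j : Int) (hi : 1 ≤ i) (hj1 : 1 ≤ j) (hjn : j < n + 1)
    (hT : (i + 1) * (j + 1) = T) : pvEntry n T i = some (i, j) := by
  have hpos : (0 : Int) < i + 1 := by omega
  have hmod : PySem.Int.mod T (i + 1) = 0 :=
    (PySem.Int.mod_eq_zero_iff_dvd T (i + 1)).mpr ⟨j + 1, hT.symm⟩
  have hdiv : PySem.Int.floordiv T (i + 1) = j + 1 := by
    rw [PySem.Int.floordiv_eq_iff_of_pos hpos]
    constructor <;> nlinarith
  unfold pvEntry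
  rw [if_pos hmod, hdiv, if_pos (by omega)]
  norm_num

lemma pvEntry_eq_none (n T i : Int) (hi : 1 ≤ i)
    (h : ∀ b : Int, 1 ≤ b → b < n + 1 → (i + 1) * (b + 1) = T → False) :
    pvEntry n T i = none := by
  have hpos : (0 : Int) < i + 1 := by omega
  unfold pvEntry
  split_ifs with hmod hb
  · exfalso
    obtain ⟨c, hc⟩ := (PySem.Int.mod_eq_zero_iff_dvd T (i + 1)).mp hmod
    have hdiv : PySem.Int.floordiv T (i + 1) = c := by
      rw [PySem.Int.floordiv_eq_iff_of_pos hpos]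
      constructor <;> nlinarith
    rw [hdiv] at hb
    exact h (c - 1) (by omega) (by omega) (by rw [hc]; ring)
  · rfl
  · rfl

/-- A's foldl step appends exactly the `pvEntry` of the index. -/
lemma pvStep_eq (n T : Int) (ret : List (Int × Int)) (i : Int) :
    (if PySem.Int.mod T (i + 1) = 0 then
       if 1 ≤ PySem.Int.floordiv T (i + 1) - 1 ∧ PySem.Int.floordiv T (i + 1) - 1 < n + 1 then
         ret ++ [(i, PySem.Int.floordiv T (i + 1) - 1)]
       else ret
     else ret) = ret ++ (pvEntry n T i).toList := by
  unfold pvEntry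
  split_ifs <;> simp

lemma pvFoldl_eq (n T : Int) :
    ∀ (l : List Int) (acc : List (Int × Int)),
      l.foldl (fun ret i =>
        if PySem.Int.mod T (i + 1) = 0 then
          let j := PySem.Int.floordiv T (i + 1) - 1
          if 1 ≤ j ∧ j < n + 1 then ret ++ [(i, j)] else ret
        else ret) acc = acc ++ l.filterMap (pvEntry n T) := by
  intro l
  induction l with
  | nil => intro acc; simp
  | cons x l ih =>
    intro acc
    simp only [List.foldl_cons, List.filterMap_cons]
    rw [pvStep_eq n T acc x, ih]
    cases pvEntry n T x <;> simp

lemma removNb_eq_filterMap (n : Int) :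
    removNb n = (PySem.List.pyRange 1 (n + 1) 1).filterMap
      (pvEntry n (PySem.Int.floordiv (n * (n + 1)) 2 + 1)) := by
  unfold removNb
  rw [pvFoldl_eq]
  simp

lemma removNbLoop_cont (total n i j : Int) (res : List (Int × Int)) (h : i ≤ n ∧ 1 ≤ j) :
    removNbLoop total n i j res =
      if (i + 1) * (j + 1) < total then removNbLoop total n (i + 1) j res
      else if total < (i + 1) * (j + 1) then removNbLoop total n i (j - 1) res
      else removNbLoop total n (i + 1) (j - 1) (res ++ [(i, j)]) := by
  rw [removNbLoop, dif_pos h]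

lemma removNbLoop_stop (total n i j : Int) (res : List (Int × Int)) (h : ¬(i ≤ n ∧ 1 ≤ j)) :
    removNbLoop total n i j res = res := by
  rw [removNbLoop, dif_neg h]

/-- Once the loop stops, the invariant forces the remaining range to contribute nothing. -/
lemma pvTail_nil (n T i j : Int) (hi : 1 ≤ i) (h : ¬(i ≤ n ∧ 1 ≤ j))
    (hinv : ∀ a b : Int, i ≤ a → a ≤ n → 1 ≤ b → b ≤ n → (a + 1) * (b + 1) = T → b ≤ j) :
    (PySem.List.pyRange i (n + 1) 1).filterMap (pvEntry n T) = [] := by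
  rw [List.filterMap_eq_nil_iff]
  intro a ha
  rw [PySem.List.mem_pyRange_one] at ha
  apply pvEntry_eq_none n T a (by omega)
  intro b hb1 hbn hprod
  rcases not_and_or.mp h with h' | h'
  · omega
  · have := hinv a b (by omega) (by omega) hb1 (by omega) hprod
    omega

/-- Main invariant lemma for the two-pointer loop. -/
lemma removNbLoop_eq (n T : Int) :
    ∀ (k : Nat) (i j : Int) (res : List (Int × Int)),
      (n - i + j + 1).toNat ≤ k → 1 ≤ i → j ≤ n →
      (∀ a b : Int, i ≤ a → a ≤ n → 1 ≤ b → b ≤ n → (a + 1) * (b + 1) = T → b ≤ j) →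
      removNbLoop T n i j res = res ++ (PySem.List.pyRange i (n + 1) 1).filterMap (pvEntry n T) := by
  intro k
  induction k with
  | zero =>
    intro i j res hk hi hjn hinv
    have h : ¬(i ≤ n ∧ 1 ≤ j) := by omega
    rw [removNbLoop_stop, pvTail_nil n T i j hi h hinv, List.append_nil]; exact h
  | succ k ih =>
    intro i j res hk hi hjn hinv
    by_cases h : i ≤ n ∧ 1 ≤ j
    · have hcons : PySem.List.pyRange i (n + 1) 1 = i :: PySem.List.pyRange (i + 1) (n + 1) 1 :=
        PySem.List.pyRange_one_cons (by omega)
      rw [removNbLoop_cont _ _ _ _ _ h]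
      rcases lt_trichotomy ((i + 1) * (j + 1)) T with hlt | heq | hgt
      · -- p < total : no solution at column i, advance i
        rw [if_pos hlt, hcons, List.filterMap_cons, pvEntry_eq_none n T i hi ?_]
        · exact ih (i + 1) j res (by omega) (by omega) hjn
            (fun a b ha han hb1 hbn hp => hinv a b (by omega) han hb1 hbn hp)
        · intro b hb1 hbn hprod
          have hble : b ≤ j := hinv i b le_rfl h.1 hb1 (by omega) hprod
          nlinarith [mul_le_mul_of_nonneg_left (show b + 1 ≤ j + 1 by omega)
            (show (0 : Int) ≤ i + 1 by omega)]
      · -- p = total : emit (i, j)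
        rw [if_neg (by omega), if_neg (by omega), hcons, List.filterMap_cons,
          pvEntry_eq_some n T i j hi h.2 (by omega) heq]
        have hinv' : ∀ a b : Int, i + 1 ≤ a → a ≤ n → 1 ≤ b → b ≤ n →
            (a + 1) * (b + 1) = T → b ≤ j - 1 := by
          intro a b ha han hb1 hbn hprod
          by_contra hc
          have h1 : (i + 2) * (j + 1) ≤ (a + 1) * (b + 1) :=
            mul_le_mul (by omega) (by omega) (by omega) (by omega)
          nlinarith
        rw [ih (i + 1) (j - 1) (res ++ [(i, j)]) (by omega) (by omega) (by omega) hinv']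
        simp
      · -- p > total : row j impossible, lower j
        rw [if_neg (by omega), if_pos hgt]
        have hinv' : ∀ a b : Int, i ≤ a → a ≤ n → 1 ≤ b → b ≤ n →
            (a + 1) * (b + 1) = T → b ≤ j - 1 := by
          intro a b ha han hb1 hbn hprod
          have hble : b ≤ j := hinv a b ha han hb1 hbn hprod
          rcases lt_or_eq_of_le hble with h' | h'
          · omega
          · exfalso
            subst h'
            nlinarith [mul_le_mul_of_nonneg_right (show i + 1 ≤ a + 1 by omega)
              (show (0 : Int) ≤ b + 1 by omega)]
        exact ih i (j - 1) res (by omega) hi (by omega) hinv'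
    · rw [removNbLoop_stop _ _ _ _ _ h, pvTail_nil n T i j hi h hinv, List.append_nil]

-- ===== VERDICT (by name: the statement is the Claim_ definition above) =====
theorem removNb_spec : Claim_equal_removNb := by
  intro n _
  unfold Spec_removNb removNb_alt
  rw [removNb_eq_filterMap,
    removNbLoop_eq n (PySem.Int.floordiv (n * (n + 1)) 2 + 1)
      ((n - 1 + n + 1).toNat) 1 n [] le_rfl le_rfl le_rfl
      (fun a b _ _ _ hbn _ => hbn)]
  simp
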